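-- pv_equiv track=rewrite | github.com/pigrew/SencoreLC102 | firmware_17/mergeRemarks.py | countStringCols
-- ===== SOURCE A (Python) =====
-- def countStringCols(str, tabwidth=4):
-- 	w = 0
-- 	for c in str:
-- 		w = w + 1
-- 		if(c == '\t'):
-- 			x = w % tabwidth
-- 			if(x>0):
-- 				w = w + (tabwidth-x)
-- 		#print ("* %c => %d" % (c, w))
-- 	return w
-- ===== SOURCE B (Python) =====
-- def countStringCols(str, tabwidth=4):
--     parts = str.split('\t')
--     w = len(parts[0])
--     for part in parts[1:]:
--         w += 1
--         x = w % tabwidth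
--         if x > 0:
--             w += tabwidth - x
--         w += len(part)
--     return w
-- ===== Notes on version B (the rewrite author's own statement) =====
-- stated objective: faster
-- what changed: B splits the string on tab characters once and works with whole-segment lengths (one length addition per segment and tab-stop rounding once per tab), instead of A's per-character loop incrementing the width one character at a time.
-- outside the precondition, e.g. on countStringCols('a\tb', 0): A raises ZeroDivisionError, B raises ZeroDivisionError
import Mathlib
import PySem

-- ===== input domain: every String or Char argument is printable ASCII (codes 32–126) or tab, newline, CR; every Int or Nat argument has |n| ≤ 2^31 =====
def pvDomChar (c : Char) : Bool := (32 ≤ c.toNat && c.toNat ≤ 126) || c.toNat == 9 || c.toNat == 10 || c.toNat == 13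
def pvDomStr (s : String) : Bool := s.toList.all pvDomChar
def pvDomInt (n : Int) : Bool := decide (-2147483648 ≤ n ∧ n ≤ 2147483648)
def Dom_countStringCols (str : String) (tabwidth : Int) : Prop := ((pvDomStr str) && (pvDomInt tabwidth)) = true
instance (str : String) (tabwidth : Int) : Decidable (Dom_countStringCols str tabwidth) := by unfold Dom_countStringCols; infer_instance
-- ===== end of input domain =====

-- B replaces A's per-character width loop by one split on '\t' plus a loop over the
-- tab-delimited segments, adding each segment's length in a single step (objective: alternative).

-- ===== PORT A =====
def countStringCols (str : String) (tabwidth : Int) : Int :=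
  str.toList.foldl (fun w c =>
    let w := w + 1
    if c = '\t' then
      let x := PySem.Int.mod w tabwidth
      if x > 0 then w + (tabwidth - x) else w
    else w) 0

-- ===== PORT B =====
def countStringCols_alt (str : String) (tabwidth : Int) : Int :=
  match PySem.Chars.splitOn str.toList ['\t'] with
  | [] => 0   -- unreachable: split never returns an empty list
  | p :: rest =>
    rest.foldl (fun w part =>
      let w := w + 1
      let x := PySem.Int.mod w tabwidth
      let w := if x > 0 then w + (tabwidth - x) else w
      w + (part.length : Int)) (p.length : Int)

-- ===== PRECONDITION & SPEC =====
-- Pre_ excludes exactly the inputs where Python A (and Python B alike) raises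
-- ZeroDivisionError: tabwidth = 0 while the string contains a tab.
def Pre_countStringCols (str : String) (tabwidth : Int) : Prop :=
  ¬ (tabwidth = 0 ∧ '\t' ∈ str.toList)
instance (str : String) (tabwidth : Int) : Decidable (Pre_countStringCols str tabwidth) := by unfold Pre_countStringCols; infer_instance
def pvWitness_countStringCols : String × Int := ("a\tb", 4)

def Spec_countStringCols (str : String) (tabwidth : Int) (out : Int) : Prop := out = countStringCols_alt str tabwidth
instance (str : String) (tabwidth : Int) (out : Int) : Decidable (Spec_countStringCols str tabwidth out) := by unfold Spec_countStringCols; infer_instance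

-- ===== CLAIM (what is proved, stated in full; the proofs are below) =====
def Claim_equal_countStringCols : Prop := ∀ (str : String) (tabwidth : Int), Dom_countStringCols str tabwidth → Pre_countStringCols str tabwidth → Spec_countStringCols str tabwidth (countStringCols str tabwidth)

-- ===== LEMMAS AND PROOFS =====

-- a simple structural recursion computing split on '\t' (proof helper only)
def split1 : List Char → List (List Char)
  | [] => [[]]
  | c :: rest =>
    match split1 rest with
    | [] => []
    | p :: ps => if c = '\t' then [] :: p :: ps else (c :: p) :: ps

theorem split1_ne_nil (l : List Char) : split1 l ≠ [] := by
  induction l with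
  | nil => simp [split1]
  | cons c rest ih =>
    cases h : split1 rest with
    | nil => exact absurd h ih
    | cons p ps =>
      simp only [split1, h]
      split <;> simp

theorem go_eq (l : List Char) : ∀ (fuel : Nat) (cur : List Char) (acc : List (List Char)),
    l.length ≤ fuel →
    PySem.Chars.splitOn.go ['\t'] fuel l cur acc
      = acc.reverse ++ (cur.reverse ++ (split1 l).head!) :: (split1 l).tail := by
  induction l with
  | nil =>
    intro fuel cur acc _
    cases fuel <;> simp [PySem.Chars.splitOn.go, split1]
  | cons c rest ih =>
    intro fuel cur acc hle
    cases fuel with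
    | zero => simp at hle
    | succ f =>
      have hf : rest.length ≤ f := by simpa using hle
      by_cases hc : c = '\t'
      · subst hc
        rw [show PySem.Chars.splitOn.go ['\t'] (f+1) ('\t' :: rest) cur acc
              = PySem.Chars.splitOn.go ['\t'] f rest [] (cur.reverse :: acc) by
            simp [PySem.Chars.splitOn.go, List.isPrefixOf]]
        rw [ih f [] (cur.reverse :: acc) hf]
        obtain ⟨p, ps, hps⟩ : ∃ p ps, split1 rest = p :: ps := by
          cases h : split1 rest with
          | nil => exact absurd h (split1_ne_nil rest)
          | cons p ps => exact ⟨p, ps, rfl⟩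
        simp [split1, hps]
      · rw [show PySem.Chars.splitOn.go ['\t'] (f+1) (c :: rest) cur acc
              = PySem.Chars.splitOn.go ['\t'] f rest (c :: cur) acc by
            simp only [PySem.Chars.splitOn.go, List.isPrefixOf]
            simp
            intro h
            exact absurd h.symm hc]
        rw [ih f (c :: cur) acc hf]
        obtain ⟨p, ps, hps⟩ : ∃ p ps, split1 rest = p :: ps := by
          cases h : split1 rest with
          | nil => exact absurd h (split1_ne_nil rest)
          | cons p ps => exact ⟨p, ps, rfl⟩
        simp [split1, hps, hc]

theorem splitOn_eq_split1 (l : List Char) : PySem.Chars.splitOn l ['\t'] = split1 l := by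
  unfold PySem.Chars.splitOn
  rw [go_eq l (l.length + 1) [] [] (by omega)]
  obtain ⟨p, ps, hps⟩ : ∃ p ps, split1 l = p :: ps := by
    cases h : split1 l with
    | nil => exact absurd h (split1_ne_nil l)
    | cons p ps => exact ⟨p, ps, rfl⟩
  simp [hps]

-- A's fold over the characters equals B's fold over the split segments,
-- for any starting width w.
theorem fold_eq_split (tw : Int) (l : List Char) : ∀ (w : Int),
    l.foldl (fun w c =>
      let w := w + 1
      if c = '\t' then
        let x := PySem.Int.mod w tw
        if x > 0 then w + (tw - x) else w
      else w) w
    = (match split1 l with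
       | [] => w
       | p :: ps => ps.foldl (fun w part =>
           let w := w + 1
           let x := PySem.Int.mod w tw
           let w := if x > 0 then w + (tw - x) else w
           w + (part.length : Int)) (w + (p.length : Int))) := by
  induction l with
  | nil => intro w; simp [split1]
  | cons c rest ih =>
    intro w
    obtain ⟨p, ps, hps⟩ : ∃ p ps, split1 rest = p :: ps := by
      cases h : split1 rest with
      | nil => exact absurd h (split1_ne_nil rest)
      | cons p ps => exact ⟨p, ps, rfl⟩
    by_cases hc : c = '\t'
    · subst hc
      simp only [List.foldl_cons, split1, hps]
      rw [ih]
      simp [hps]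
    · simp only [List.foldl_cons, split1, hps, if_neg hc]
      rw [ih]
      simp [hps]
      ring_nf

-- ===== VERDICT (by name: the statement is the Claim_ definition above) =====
theorem countStringCols_spec : Claim_equal_countStringCols := by
  unfold Claim_equal_countStringCols
  intro str tw _ _
  unfold Spec_countStringCols countStringCols countStringCols_alt
  rw [splitOn_eq_split1, fold_eq_split]
  obtain ⟨p, ps, hps⟩ : ∃ p ps, split1 str.toList = p :: ps := by
    cases h : split1 str.toList with
    | nil => exact absurd h (split1_ne_nil str.toList)
    | cons p ps => exact ⟨p, ps, rfl⟩
  simp [hps]
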